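-- pv_equiv track=rewrite | github.com/jccmontoya/mesa_jorge | src/buttonmanager.py | button_2_song_index
-- ===== SOURCE A (Python) =====
-- def button_2_song_index(data):
--     acc = 1
--     value = 0
--     for x in data:
--         if x:
--             value = value + acc
--         acc = acc * 2
--     return value
-- ===== SOURCE B (Python) =====
-- def button_2_song_index(data):
--     value = 0
--     for x in reversed(data):
--         value = value * 2 + (1 if x else 0)
--     return value
-- ===== Notes on version B (the rewrite author's own statement) =====
-- stated objective: idiomatic
-- what changed: Replaces the LSB-first pass with an explicit power-of-two accumulator by Horner's method over the reversed list (value = value*2 + bit), dropping the acc variable.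
import Mathlib
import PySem

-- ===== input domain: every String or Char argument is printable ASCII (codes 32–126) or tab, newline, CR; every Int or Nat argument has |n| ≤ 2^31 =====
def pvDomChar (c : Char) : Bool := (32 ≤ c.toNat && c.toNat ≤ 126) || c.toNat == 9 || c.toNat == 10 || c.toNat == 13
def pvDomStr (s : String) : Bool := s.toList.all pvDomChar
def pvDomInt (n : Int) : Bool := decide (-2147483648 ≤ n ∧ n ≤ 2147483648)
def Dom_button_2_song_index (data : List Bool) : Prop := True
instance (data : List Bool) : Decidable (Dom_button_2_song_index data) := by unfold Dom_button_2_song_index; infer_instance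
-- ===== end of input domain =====

-- B replaces A's LSB-first acc/value loop with Horner's method over the reversed list (same result, same O(n) cost).


-- ===== PORT A =====
-- transliteration of A: fold carrying (value, acc)
def button_2_song_index (data : List Bool) : Int :=
  (data.foldl (fun (s : Int × Int) x => ((if x then s.1 + s.2 else s.1), s.2 * 2)) (0, 1)).1

-- ===== PORT B =====
-- transliteration of B: Horner's method over the reversed list
def button_2_song_index_alt (data : List Bool) : Int :=
  data.reverse.foldl (fun v x => v * 2 + (if x then 1 else 0)) 0

-- ===== PRECONDITION & SPEC =====
def Spec_button_2_song_index (data : List Bool) (out : Int) : Prop := out = button_2_song_index_alt data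
instance (data : List Bool) (out : Int) : Decidable (Spec_button_2_song_index data out) := by unfold Spec_button_2_song_index; infer_instance

-- ===== CLAIM (what is proved, stated in full; the proofs are below) =====
def Claim_equal_button_2_song_index : Prop := ∀ (data : List Bool), Dom_button_2_song_index data → Spec_button_2_song_index data (button_2_song_index data)

-- ===== LEMMAS AND PROOFS =====

-- ===== VERDICT (by name: the statement is the Claim_ definition above) =====
lemma altFoldr (data : List Bool) :
    button_2_song_index_alt data
      = data.foldr (fun x v => v * 2 + (if x then 1 else 0)) 0 := by
  simp [button_2_song_index_alt, List.foldl_reverse]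

lemma aInvariant (data : List Bool) : ∀ (v a : Int),
    (data.foldl (fun (s : Int × Int) x => ((if x then s.1 + s.2 else s.1), s.2 * 2)) (v, a)).1
      = v + a * data.foldr (fun x v => v * 2 + (if x then 1 else 0)) 0 := by
  induction data with
  | nil => intro v a; simp
  | cons x xs ih =>
    intro v a
    simp only [List.foldl_cons, List.foldr_cons, ih]
    cases x <;> simp <;> ring

theorem button_2_song_index_spec : Claim_equal_button_2_song_index := by
  intro data _
  unfold Spec_button_2_song_index button_2_song_index
  rw [altFoldr, aInvariant]
  ring
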